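-- pv_equiv track=rewrite | github.com/Gragory/text_generator | train.py | count_create
-- ===== SOURCE A (Python) =====
-- def count_create(list_of_words):
--     count_dict = {}
--     for i in range(len(list_of_words) - 2):
--         if not list_of_words[i + 1] in count_dict.keys():
--             count_dict.update({list_of_words[i + 1]: {list_of_words[i + 2]: 1}})
--         else:
--             r = False
--             if list_of_words[i + 2] in count_dict[list_of_words[i + 1]].keys():
--                 count_dict[list_of_words[i + 1]][list_of_words[i + 2]] += 1
--             else:
--                 count_dict[list_of_words[i + 1]].update({list_of_words[i + 2]: 1})
--     return count_dict
-- ===== SOURCE B (Python) =====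
-- def count_create(list_of_words):
--     # phase 1: flat count of consecutive bigrams (skipping the pair at index 0, as in A)
--     pair_counts = {}
--     for pair in zip(list_of_words[1:], list_of_words[2:]):
--         pair_counts[pair] = pair_counts.get(pair, 0) + 1
--     # phase 2: regroup the flat counts into nested dicts
--     result = {}
--     for (w1, w2), c in pair_counts.items():
--         result.setdefault(w1, {})[w2] = c
--     return result
-- ===== Notes on version B (the rewrite author's own statement) =====
-- stated objective: alternative
-- what changed: A builds the nested dict incrementally with a three-way branch per index; B first counts all consecutive bigrams flat in one pass over zip(words[1:], words[2:]) and then regroups the flat counts into nested dicts in a second pass.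
import Mathlib
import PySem

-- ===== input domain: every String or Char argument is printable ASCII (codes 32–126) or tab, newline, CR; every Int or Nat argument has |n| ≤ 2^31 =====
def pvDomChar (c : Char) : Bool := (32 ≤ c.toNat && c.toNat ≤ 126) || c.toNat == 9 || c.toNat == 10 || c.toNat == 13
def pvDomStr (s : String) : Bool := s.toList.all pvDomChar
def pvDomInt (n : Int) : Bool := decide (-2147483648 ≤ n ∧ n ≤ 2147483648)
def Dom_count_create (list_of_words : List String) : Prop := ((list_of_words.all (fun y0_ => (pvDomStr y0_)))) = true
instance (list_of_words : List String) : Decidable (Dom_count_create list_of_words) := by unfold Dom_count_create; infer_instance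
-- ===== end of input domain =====

-- B counts all consecutive bigrams flat in one pass, then regroups them into nested dicts
-- in a second pass; A builds the nested dict incrementally with a three-way branch per index.

-- B: same bigram-successor counts, but computed in two phases — one flat pass counting
-- consecutive bigrams, then a second pass regrouping the flat counts into nested dicts
-- (A builds the nested dict incrementally with a three-way branch per index).

-- ===== PORT A =====
def count_create (list_of_words : List String) : List (String × List (String × Int)) :=
  let count_dict :=
    (PySem.List.pyRange 0 ((list_of_words.length : Int) - 2) 1).foldl
      (fun count_dict i =>
        let w1 := PySem.List.pyGetD list_of_words (i + 1) ""
        let w2 := PySem.List.pyGetD list_of_words (i + 2) ""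
        if !(count_dict.contains w1) then
          count_dict.insert w1 (PySem.Dict.mk [(w2, (1 : Int))])
        else
          let inner := count_dict.getD w1 PySem.Dict.empty
          if inner.contains w2 then
            count_dict.insert w1 (inner.insert w2 (inner.getD w2 0 + 1))
          else
            count_dict.insert w1 (inner.insert w2 1))
      PySem.Dict.empty
  count_dict.items.map (fun p => (p.1, p.2.items))


-- ===== PORT B =====
def count_create_alt (list_of_words : List String) : List (String × List (String × Int)) :=
  let pairs := (PySem.List.slice list_of_words (some 1) none).zip
               (PySem.List.slice list_of_words (some 2) none)
  let pair_counts := pairs.foldl (fun d p => d.insert p (d.getD p 0 + 1)) PySem.Dict.empty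
  let result := pair_counts.items.foldl
      (fun r q => r.insert q.1.1 ((r.getD q.1.1 PySem.Dict.empty).insert q.1.2 q.2))
      PySem.Dict.empty
  result.items.map (fun p => (p.1, p.2.items))


-- ===== PRECONDITION & SPEC =====
def Spec_count_create (list_of_words : List String) (out : List (String × List (String × Int))) : Prop := out = count_create_alt list_of_words
instance (list_of_words : List String) (out : List (String × List (String × Int))) : Decidable (Spec_count_create list_of_words out) := by unfold Spec_count_create; infer_instance

-- ===== CLAIM (what is proved, stated in full; the proofs are below) =====
def Claim_equal_count_create : Prop := ∀ (list_of_words : List String), Dom_count_create list_of_words → Spec_count_create list_of_words (count_create list_of_words)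

-- ===== LEMMAS AND PROOFS =====

theorem pv_ofList_filter {α : Type} [BEq α] [LawfulBEq α] (P : α → Bool) (l : List α) :
    PySem.Set.ofList (l.filter P) = (PySem.Set.ofList l).filter P := by
  induction l using List.reverseRecOn with
  | nil => rfl
  | append_singleton xs x ih =>
    rw [List.filter_append, PySem.Set.ofList_append_singleton, PySem.Set.add_eq_ite]
    by_cases hp : P x = true
    · have hfx : List.filter P [x] = [x] := by simp [hp]
      rw [hfx, PySem.Set.ofList_append_singleton, PySem.Set.add_eq_ite]
      by_cases hx : x ∈ PySem.Set.ofList xs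
      · have hxl : x ∈ xs := (PySem.Set.mem_ofList xs x).1 hx
        have hm : x ∈ PySem.Set.ofList (xs.filter P) :=
          (PySem.Set.mem_ofList _ x).2 (List.mem_filter.2 ⟨hxl, hp⟩)
        simp [hx, ih, hp]
      · have hxl : x ∉ xs := fun h => hx ((PySem.Set.mem_ofList xs x).2 h)
        have hm : x ∉ PySem.Set.ofList (xs.filter P) := fun h =>
          hxl (List.mem_filter.1 ((PySem.Set.mem_ofList _ x).1 h)).1
        simp [hx, ih, List.filter_append, hp]
    · have hfx : List.filter P [x] = [] := by simp [hp]
      rw [hfx, List.append_nil, ih]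
      by_cases hx : x ∈ PySem.Set.ofList xs
      · simp [hx]
      · simp [hx, List.filter_append, hp]

theorem pv_ofList_map_inj {α β : Type} [BEq α] [LawfulBEq α] [BEq β] [LawfulBEq β]
    (f : α → β) (l : List α) (hinj : ∀ a ∈ l, ∀ b ∈ l, f a = f b → a = b) :
    PySem.Set.ofList (l.map f) = (PySem.Set.ofList l).map f := by
  induction l using List.reverseRecOn with
  | nil => rfl
  | append_singleton xs x ih =>
    have hinj' : ∀ a ∈ xs, ∀ b ∈ xs, f a = f b → a = b := fun a ha b hb =>
      hinj a (List.mem_append_left _ ha) b (List.mem_append_left _ hb)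
    rw [List.map_append, List.map_singleton, PySem.Set.ofList_append_singleton,
        PySem.Set.ofList_append_singleton, PySem.Set.add_eq_ite, PySem.Set.add_eq_ite,
        ih hinj']
    by_cases hx : x ∈ PySem.Set.ofList xs
    · have hxl : x ∈ xs := (PySem.Set.mem_ofList xs x).1 hx
      have hfm : f x ∈ (PySem.Set.ofList xs).map f := List.mem_map_of_mem hx
      simp [hx, hfm]
    · have hxl : x ∉ xs := fun h => hx ((PySem.Set.mem_ofList xs x).2 h)
      have hfm : f x ∉ (PySem.Set.ofList xs).map f := by
        intro h
        obtain ⟨a, ha, hfa⟩ := List.mem_map.1 h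
        have hal : a ∈ xs := (PySem.Set.mem_ofList xs a).1 ha
        have : a = x := hinj a (List.mem_append_left _ hal) x (List.mem_append_right _ (List.mem_singleton_self x)) hfa
        exact hxl (this ▸ hal)
      simp [hx, hfm]

theorem pv_ofList_ofList_map {α β : Type} [BEq α] [LawfulBEq α] [BEq β] [LawfulBEq β]
    (f : α → β) (l : List α) :
    PySem.Set.ofList ((PySem.Set.ofList l).map f) = PySem.Set.ofList (l.map f) := by
  induction l using List.reverseRecOn with
  | nil => rfl
  | append_singleton xs x ih =>
    rw [PySem.Set.ofList_append_singleton, PySem.Set.add_eq_ite, List.map_append,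
        List.map_singleton, PySem.Set.ofList_append_singleton]
    by_cases hx : x ∈ PySem.Set.ofList xs
    · have hfm : f x ∈ (PySem.Set.ofList xs).map f := List.mem_map_of_mem hx
      have hfm2 : f x ∈ PySem.Set.ofList (xs.map f) := by
        have hxl : x ∈ xs := (PySem.Set.mem_ofList xs x).1 hx
        exact (PySem.Set.mem_ofList _ _).2 (List.mem_map_of_mem hxl)
      rw [if_pos hx, ih, PySem.Set.add_of_mem hfm2]
    · rw [if_neg hx, List.map_append, List.map_singleton,
          PySem.Set.ofList_append_singleton, ih]

def pvStepA (d : PySem.Dict String (PySem.Dict String Int)) (p : String × String) :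
    PySem.Dict String (PySem.Dict String Int) :=
  if !(d.contains p.1) then
    d.insert p.1 (PySem.Dict.mk [(p.2, (1 : Int))])
  else
    let inner := d.getD p.1 PySem.Dict.empty
    if inner.contains p.2 then d.insert p.1 (inner.insert p.2 (inner.getD p.2 0 + 1))
    else d.insert p.1 (inner.insert p.2 1)

def pvInn (ps : List (String × String)) (w1 : String) : List (String × Int) :=
  (PySem.Set.ofList ((ps.filter (fun q => q.1 == w1)).map Prod.snd)).map
    (fun w2 => (w2, (ps.count (w1, w2) : Int)))

def pvF (ps : List (String × String)) : List (String × PySem.Dict String Int) :=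
  (PySem.Set.ofList (ps.map Prod.fst)).map (fun w1 => (w1, PySem.Dict.mk (pvInn ps w1)))

theorem pv_mem_sndfilter (ps : List (String × String)) (w1 w2 : String) :
    w2 ∈ (ps.filter (fun q => q.1 == w1)).map Prod.snd ↔ (w1, w2) ∈ ps := by
  constructor
  · intro h
    obtain ⟨q, hq, hsnd⟩ := List.mem_map.1 h
    obtain ⟨hqm, hfst⟩ := List.mem_filter.1 hq
    have h1 : q.1 = w1 := by simpa using hfst
    have : q = (w1, w2) := by
      cases q; simp_all
    exact this ▸ hqm
  · intro h
    exact List.mem_map.2 ⟨(w1, w2), List.mem_filter.2 ⟨h, by simp⟩, rfl⟩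

theorem pvInn_append_ne (ps : List (String × String)) (p : String × String) (w : String)
    (h : w ≠ p.1) : pvInn (ps ++ [p]) w = pvInn ps w := by
  unfold pvInn
  have hf : (ps ++ [p]).filter (fun q => q.1 == w) = ps.filter (fun q => q.1 == w) := by
    rw [List.filter_append]
    have : [p].filter (fun q => q.1 == w) = [] := by
      simp [show ¬ p.1 = w from fun e => h e.symm]
    simp [this]
  rw [hf]
  apply List.map_congr_left
  intro w2 hw2
  have hne : (w, w2) ≠ p := by
    intro e; exact h (by rw [← e])
  have hne' : ¬ p = (w, w2) := fun e => hne e.symm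
  simp [List.count_append, hne']

theorem pv_keys_F_nodup (ps : List (String × String)) :
    (PySem.Dict.mk (pvF ps)).keys.Nodup := by
  have : (PySem.Dict.mk (pvF ps)).keys = PySem.Set.ofList (ps.map Prod.fst) := by
    simp [PySem.Dict.keys_mk, pvF, List.map_map, Function.comp_def]
  rw [this]; exact PySem.Set.nodup_ofList _

theorem pv_contains_F (ps : List (String × String)) (w : String) :
    (PySem.Dict.mk (pvF ps)).contains w = true ↔ w ∈ ps.map Prod.fst := by
  rw [PySem.Dict.contains_mk]
  simp [pvF, List.any_map, Function.comp_def, List.any_eq_true,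
        PySem.Set.mem_ofList]

theorem pv_getD_F (ps : List (String × String)) (w : String) (h : w ∈ ps.map Prod.fst) :
    (PySem.Dict.mk (pvF ps)).getD w PySem.Dict.empty = PySem.Dict.mk (pvInn ps w) := by
  have hmem : (w, PySem.Dict.mk (pvInn ps w)) ∈ (PySem.Dict.mk (pvF ps)).items :=
    List.mem_map_of_mem ((PySem.Set.mem_ofList _ w).2 h)
  exact PySem.Dict.getD_of_mem_items _ hmem (pv_keys_F_nodup ps) _

theorem pv_inn_nodup (ps : List (String × String)) (w : String) :
    (PySem.Dict.mk (pvInn ps w)).keys.Nodup := by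
  have : (PySem.Dict.mk (pvInn ps w)).keys
      = PySem.Set.ofList ((ps.filter (fun q => q.1 == w)).map Prod.snd) := by
    simp [PySem.Dict.keys_mk, pvInn, List.map_map, Function.comp_def]
  rw [this]; exact PySem.Set.nodup_ofList _

theorem pv_inn_contains (ps : List (String × String)) (w v : String) :
    (PySem.Dict.mk (pvInn ps w)).contains v = true ↔ (w, v) ∈ ps := by
  rw [PySem.Dict.contains_mk, ← pv_mem_sndfilter ps w v]
  simp [pvInn, List.any_map, Function.comp_def, List.any_eq_true,
        PySem.Set.mem_ofList]

theorem pv_inn_getD (ps : List (String × String)) (w v : String) (h : (w, v) ∈ ps) :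
    (PySem.Dict.mk (pvInn ps w)).getD v 0 = (ps.count (w, v) : Int) := by
  have hmem : (v, (ps.count (w, v) : Int)) ∈ (PySem.Dict.mk (pvInn ps w)).items :=
    List.mem_map_of_mem ((PySem.Set.mem_ofList _ v).2 ((pv_mem_sndfilter ps w v).2 h))
  exact PySem.Dict.getD_of_mem_items _ hmem (pv_inn_nodup ps w) _

theorem pv_inn_append_self_new (ps : List (String × String)) (w1 w2 : String)
    (h : (w1, w2) ∉ ps) :
    pvInn (ps ++ [(w1, w2)]) w1
      = pvInn ps w1 ++ [(w2, 1)] := by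
  unfold pvInn
  have hS : ¬ w2 ∈ (ps.filter (fun q => q.1 == w1)).map Prod.snd := by
    rw [pv_mem_sndfilter]; exact h
  have hfil : (ps ++ [(w1, w2)]).filter (fun q => q.1 == w1)
      = ps.filter (fun q => q.1 == w1) ++ [(w1, w2)] := by
    simp [List.filter_append]
  rw [hfil, List.map_append, List.map_singleton, PySem.Set.ofList_append_singleton,
      PySem.Set.add_eq_ite]
  have hS' : ¬ w2 ∈ PySem.Set.ofList ((ps.filter (fun q => q.1 == w1)).map Prod.snd) := by
    rw [PySem.Set.mem_ofList]; exact hS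
  rw [if_neg hS', List.map_append]
  congr 1
  · apply List.map_congr_left
    intro v hv
    have hvne : ¬ ((w1, w2) = (w1, v)) := by
      intro e
      have : v = w2 := by cases e; rfl
      exact hS' (this ▸ hv)
    simp [List.count_append, hvne]
  · have hcnt : (w1, w2) ∉ ps := h
    simp [List.count_append, List.count_eq_zero.2 hcnt]

theorem pv_stepA_F (ps : List (String × String)) (p : String × String) :
    pvStepA (PySem.Dict.mk (pvF ps)) p = PySem.Dict.mk (pvF (ps ++ [p])) := by
  obtain ⟨w1, w2⟩ := p
  by_cases hmem : w1 ∈ ps.map Prod.fst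
  · -- w1 already a key
    have hc : (PySem.Dict.mk (pvF ps)).contains w1 = true := (pv_contains_F ps w1).2 hmem
    have hkeys : PySem.Set.ofList ((ps ++ [(w1, w2)]).map Prod.fst)
        = PySem.Set.ofList (ps.map Prod.fst) := by
      rw [List.map_append, List.map_singleton, PySem.Set.ofList_append_singleton,
          PySem.Set.add_of_mem ((PySem.Set.mem_ofList _ _).2 hmem)]
    by_cases hpair : (w1, w2) ∈ ps
    · -- bigram already counted: bump in place
      have hic : (PySem.Dict.mk (pvInn ps w1)).contains w2 = true :=
        (pv_inn_contains ps w1 w2).2 hpair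
      have hinner : pvStepA (PySem.Dict.mk (pvF ps)) (w1, w2)
          = (PySem.Dict.mk (pvF ps)).insert w1
              ((PySem.Dict.mk (pvInn ps w1)).insert w2 ((ps.count (w1, w2) : Int) + 1)) := by
        simp only [pvStepA, hc, Bool.not_true, Bool.false_eq_true, if_false,
          pv_getD_F ps w1 hmem, hic, if_true, pv_inn_getD ps w1 w2 hpair]
      rw [hinner]
      apply PySem.Dict.ext
      rw [PySem.Dict.items_insert_of_contains _ _ hc]
      show (pvF ps).map _ = pvF (ps ++ [(w1, w2)])
      unfold pvF
      rw [hkeys, List.map_map]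
      apply List.map_congr_left
      intro w hw
      by_cases hww : w = w1
      · subst hww
        simp only [Function.comp_def, beq_self_eq_true, if_true]
        congr 1
        apply PySem.Dict.ext
        rw [PySem.Dict.items_insert_of_contains _ _ hic]
        show (pvInn ps w).map _ = pvInn (ps ++ [(w, w2)]) w
        unfold pvInn
        have hfil : (ps ++ [(w, w2)]).filter (fun q => q.1 == w)
            = ps.filter (fun q => q.1 == w) ++ [(w, w2)] := by
          simp [List.filter_append]
        rw [hfil, List.map_append, List.map_singleton, PySem.Set.ofList_append_singleton,
            PySem.Set.add_of_mem ((PySem.Set.mem_ofList _ _).2 ((pv_mem_sndfilter ps w w2).2 hpair)),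
            List.map_map]
        apply List.map_congr_left
        intro v hv
        by_cases hvw : v = w2
        · subst hvw
          simp [List.count_append]
        · have hvne : ¬ ((w, w2) = (w, v)) := fun e => hvw (congrArg Prod.snd e).symm
          simp [hvw, List.count_append, hvne]
      · have hbeq : ((w, PySem.Dict.mk (pvInn ps w)).1 == w1) = false := by
          simp [hww]
        simp only [Function.comp_def, hbeq, Bool.false_eq_true, if_false]
        rw [pvInn_append_ne ps (w1, w2) w hww]
    · -- key present, bigram new: append to inner dict
      have hic : (PySem.Dict.mk (pvInn ps w1)).contains w2 = false := by
        rw [← Bool.not_eq_true, pv_inn_contains ps w1 w2]; exact hpair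
      have hinner : pvStepA (PySem.Dict.mk (pvF ps)) (w1, w2)
          = (PySem.Dict.mk (pvF ps)).insert w1
              ((PySem.Dict.mk (pvInn ps w1)).insert w2 1) := by
        simp only [pvStepA, hc, Bool.not_true, Bool.false_eq_true, if_false,
          pv_getD_F ps w1 hmem, hic, if_false]
      rw [hinner]
      apply PySem.Dict.ext
      rw [PySem.Dict.items_insert_of_contains _ _ hc]
      show (pvF ps).map _ = pvF (ps ++ [(w1, w2)])
      unfold pvF
      rw [hkeys, List.map_map]
      apply List.map_congr_left
      intro w hw
      by_cases hww : w = w1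
      · subst hww
        simp only [Function.comp_def, beq_self_eq_true, if_true]
        congr 1
        apply PySem.Dict.ext
        rw [PySem.Dict.items_insert_of_not_contains _ _ hic]
        show pvInn ps w ++ [(w2, 1)] = pvInn (ps ++ [(w, w2)]) w
        exact (pv_inn_append_self_new ps w w2 hpair).symm
      · have hbeq : ((w, PySem.Dict.mk (pvInn ps w)).1 == w1) = false := by
          simp [hww]
        simp only [Function.comp_def, hbeq, Bool.false_eq_true, if_false]
        rw [pvInn_append_ne ps (w1, w2) w hww]
  · -- fresh key
    have hc : (PySem.Dict.mk (pvF ps)).contains w1 = false := by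
      rw [← Bool.not_eq_true, pv_contains_F ps w1]; exact hmem
    have hstep : pvStepA (PySem.Dict.mk (pvF ps)) (w1, w2)
        = (PySem.Dict.mk (pvF ps)).insert w1 (PySem.Dict.mk [(w2, (1 : Int))]) := by
      simp only [pvStepA, hc, Bool.not_false, if_true]
    rw [hstep]
    apply PySem.Dict.ext
    rw [PySem.Dict.items_insert_of_not_contains _ _ hc]
    show pvF ps ++ [(w1, PySem.Dict.mk [(w2, 1)])] = pvF (ps ++ [(w1, w2)])
    unfold pvF
    have hkeys : PySem.Set.ofList ((ps ++ [(w1, w2)]).map Prod.fst)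
        = PySem.Set.ofList (ps.map Prod.fst) ++ [w1] := by
      rw [List.map_append, List.map_singleton, PySem.Set.ofList_append_singleton,
          PySem.Set.add_of_not_mem (fun h => hmem ((PySem.Set.mem_ofList _ _).1 h))]
    rw [hkeys, List.map_append, List.map_singleton]
    have hpair : (w1, w2) ∉ ps := fun h => hmem (List.mem_map_of_mem h)
    congr 1
    · apply List.map_congr_left
      intro w hw
      have hww : w ≠ w1 := by
        intro e
        exact hmem (e ▸ (PySem.Set.mem_ofList _ w).1 hw)
      rw [pvInn_append_ne ps (w1, w2) w hww]
    · congr 2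
      unfold pvInn
      have hfil : (ps ++ [(w1, w2)]).filter (fun q => q.1 == w1) = [(w1, w2)] := by
        rw [List.filter_append]
        have h1 : ps.filter (fun q => q.1 == w1) = [] := by
          rw [List.filter_eq_nil_iff]
          intro q hq hbq
          exact hmem (by
            have : q.1 = w1 := by simpa using hbq
            exact this ▸ List.mem_map_of_mem hq)
        simp [h1]
      have hone : PySem.Set.ofList [w2] = [w2] := PySem.Set.ofList_eq_self_of_nodup [w2] (List.nodup_singleton w2)
      rw [hfil, List.map_singleton, hone]
      simp [List.count_append, List.count_eq_zero.2 hpair]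

theorem pv_foldA (ps : List (String × String)) :
    ps.foldl pvStepA PySem.Dict.empty = PySem.Dict.mk (pvF ps) := by
  induction ps using List.reverseRecOn with
  | nil => rfl
  | append_singleton qs p ih =>
    rw [List.foldl_append, List.foldl_cons, List.foldl_nil, ih, pv_stepA_F]

def pvStepR (r : PySem.Dict String (PySem.Dict String Int)) (q : (String × String) × Int) :
    PySem.Dict String (PySem.Dict String Int) :=
  r.insert q.1.1 ((r.getD q.1.1 PySem.Dict.empty).insert q.1.2 q.2)

def pvG (L : List ((String × String) × Int)) : List (String × PySem.Dict String Int) :=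
  (PySem.Set.ofList (L.map (fun q => q.1.1))).map
    (fun w1 => (w1, PySem.Dict.mk ((L.filter (fun q => q.1.1 == w1)).map
      (fun q => (q.1.2, q.2)))))

theorem pv_keys_G_nodup (L : List ((String × String) × Int)) :
    (PySem.Dict.mk (pvG L)).keys.Nodup := by
  have : (PySem.Dict.mk (pvG L)).keys = PySem.Set.ofList (L.map (fun q => q.1.1)) := by
    simp [PySem.Dict.keys_mk, pvG, List.map_map, Function.comp_def]
  rw [this]; exact PySem.Set.nodup_ofList _

theorem pv_contains_G (L : List ((String × String) × Int)) (w : String) :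
    (PySem.Dict.mk (pvG L)).contains w = true ↔ w ∈ L.map (fun q => q.1.1) := by
  rw [PySem.Dict.contains_mk]
  simp [pvG, List.any_map, Function.comp_def, List.any_eq_true, PySem.Set.mem_ofList]

theorem pv_getD_G (L : List ((String × String) × Int)) (w : String)
    (h : w ∈ L.map (fun q => q.1.1)) :
    (PySem.Dict.mk (pvG L)).getD w PySem.Dict.empty
      = PySem.Dict.mk ((L.filter (fun q => q.1.1 == w)).map (fun q => (q.1.2, q.2))) := by
  have hmem : (w, PySem.Dict.mk ((L.filter (fun q => q.1.1 == w)).map (fun q => (q.1.2, q.2))))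
      ∈ (PySem.Dict.mk (pvG L)).items :=
    List.mem_map_of_mem ((PySem.Set.mem_ofList _ w).2 h)
  exact PySem.Dict.getD_of_mem_items _ hmem (pv_keys_G_nodup L) _

theorem pv_foldR (L : List ((String × String) × Int)) (hnd : (L.map Prod.fst).Nodup) :
    L.foldl pvStepR PySem.Dict.empty = PySem.Dict.mk (pvG L) := by
  induction L using List.reverseRecOn with
  | nil => rfl
  | append_singleton qs q ih =>
    have hnd' : (qs.map Prod.fst).Nodup := by
      rw [List.map_append] at hnd; exact (List.nodup_append.1 hnd).1
    have hfresh : q.1 ∉ qs.map Prod.fst := by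
      rw [List.map_append] at hnd
      intro h
      exact List.disjoint_of_nodup_append hnd h (List.mem_singleton_self _)
    rw [List.foldl_append, List.foldl_cons, List.foldl_nil, ih hnd']
    obtain ⟨⟨w1, w2⟩, c⟩ := q
    apply PySem.Dict.ext
    by_cases hmem : w1 ∈ qs.map (fun q => q.1.1)
    · -- w1 already a result key; w2 is fresh inside (fsts are distinct)
      have hc : (PySem.Dict.mk (pvG qs)).contains w1 = true := (pv_contains_G qs w1).2 hmem
      have hic : (PySem.Dict.mk ((qs.filter (fun q => q.1.1 == w1)).map
          (fun q => (q.1.2, q.2)))).contains w2 = false := by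
        rw [← Bool.not_eq_true, PySem.Dict.contains_mk]
        simp only [List.any_eq_true, not_exists, not_and]
        intro p hp
        obtain ⟨q', hq', hpq⟩ := List.mem_map.1 hp
        obtain ⟨hq'm, hq'f⟩ := List.mem_filter.1 hq'
        intro hbeq
        apply hfresh
        have h1 : q'.1.1 = w1 := by simpa using hq'f
        have h2 : p.1 = w2 := by simpa using hbeq
        have h3 : q'.1.2 = w2 := by rw [← hpq] at h2; simpa using h2
        have : q'.1 = (w1, w2) := by
          cases hq1 : q'.1; simp_all
        have h4 : q'.1 ∈ qs.map Prod.fst := List.mem_map_of_mem hq'm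
        exact this ▸ h4
      show (pvStepR (PySem.Dict.mk (pvG qs)) ((w1, w2), c)).items = _
      unfold pvStepR
      simp only
      rw [pv_getD_G qs w1 hmem, PySem.Dict.items_insert_of_contains _ _ hc]
      show (pvG qs).map _ = pvG (qs ++ [((w1, w2), c)])
      unfold pvG
      have hkeys : PySem.Set.ofList ((qs ++ [((w1, w2), c)]).map (fun q => q.1.1))
          = PySem.Set.ofList (qs.map (fun q => q.1.1)) := by
        rw [List.map_append, List.map_singleton, PySem.Set.ofList_append_singleton,
            PySem.Set.add_of_mem ((PySem.Set.mem_ofList _ _).2 hmem)]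
      rw [hkeys, List.map_map]
      apply List.map_congr_left
      intro w hw
      by_cases hww : w = w1
      · subst hww
        simp only [Function.comp_def, beq_self_eq_true, if_true]
        congr 1
        apply PySem.Dict.ext
        rw [PySem.Dict.items_insert_of_not_contains _ _ hic]
        have hfil : (qs ++ [((w, w2), c)]).filter (fun q => q.1.1 == w)
            = qs.filter (fun q => q.1.1 == w) ++ [((w, w2), c)] := by
          simp [List.filter_append]
        rw [hfil, List.map_append, List.map_singleton]
      · have hbeq : ((w, PySem.Dict.mk ((qs.filter (fun q => q.1.1 == w)).map
            (fun q => (q.1.2, q.2)))).1 == w1) = false := by simp [hww]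
        simp only [Function.comp_def, hbeq, Bool.false_eq_true, if_false]
        have hfil : (qs ++ [((w1, w2), c)]).filter (fun q => q.1.1 == w)
            = qs.filter (fun q => q.1.1 == w) := by
          rw [List.filter_append]
          have : [((w1, w2), c)].filter (fun q => q.1.1 == w) = [] := by
            simp [show ¬ w1 = w from fun e => hww e.symm]
          simp [this]
        rw [hfil]
    · -- fresh result key
      have hc : (PySem.Dict.mk (pvG qs)).contains w1 = false := by
        rw [← Bool.not_eq_true, pv_contains_G qs w1]; exact hmem
      show (pvStepR (PySem.Dict.mk (pvG qs)) ((w1, w2), c)).items = _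
      unfold pvStepR
      simp only
      rw [PySem.Dict.getD_of_not_contains _ _ hc, PySem.Dict.items_insert_of_not_contains _ _ hc]
      show pvG qs ++ [(w1, PySem.Dict.empty.insert w2 c)] = pvG (qs ++ [((w1, w2), c)])
      unfold pvG
      have hkeys : PySem.Set.ofList ((qs ++ [((w1, w2), c)]).map (fun q => q.1.1))
          = PySem.Set.ofList (qs.map (fun q => q.1.1)) ++ [w1] := by
        rw [List.map_append, List.map_singleton, PySem.Set.ofList_append_singleton,
            PySem.Set.add_of_not_mem (fun h => hmem ((PySem.Set.mem_ofList _ _).1 h))]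
      rw [hkeys, List.map_append, List.map_singleton]
      congr 1
      · apply List.map_congr_left
        intro w hw
        have hww : w ≠ w1 := fun e => hmem (e ▸ (PySem.Set.mem_ofList _ w).1 hw)
        have hfil : (qs ++ [((w1, w2), c)]).filter (fun q => q.1.1 == w)
            = qs.filter (fun q => q.1.1 == w) := by
          rw [List.filter_append]
          have : [((w1, w2), c)].filter (fun q => q.1.1 == w) = [] := by
            simp [show ¬ w1 = w from fun e => hww e.symm]
          simp [this]
        rw [hfil]
      · have hfil : (qs ++ [((w1, w2), c)]).filter (fun q => q.1.1 == w1) = [((w1, w2), c)] := by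
          rw [List.filter_append]
          have h1 : qs.filter (fun q => q.1.1 == w1) = [] := by
            rw [List.filter_eq_nil_iff]
            intro q hq hbq
            exact hmem (by
              have : q.1.1 = w1 := by simpa using hbq
              exact this ▸ List.mem_map_of_mem hq)
          simp [h1]
        rw [hfil]
        rfl

theorem pv_zip_pairs (xs : List String) :
    (xs.drop 1).zip (xs.drop 2)
      = (List.range (xs.length - 2)).map (fun k => (xs.getD (k + 1) "", xs.getD (k + 2) "")) := by
  apply List.ext_getElem
  · simp [List.length_zip]; omega
  · intro i h1 h2
    have hlen : i < xs.length - 2 := by simp [List.length_zip] at h1; omega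
    have hi1 : 1 + i < xs.length := by omega
    have hi2 : 2 + i < xs.length := by omega
    rw [List.getElem_zip]
    simp only [List.getElem_drop, List.getElem_map, List.getElem_range,
      List.getD_eq_getElem xs "" (show i + 1 < xs.length by omega),
      List.getD_eq_getElem xs "" (show i + 2 < xs.length by omega)]
    have e1 : xs[1 + i]'hi1 = xs[i + 1]'(by omega) := by congr 1; omega
    have e2 : xs[2 + i]'hi2 = xs[i + 2]'(by omega) := by congr 1; omega
    rw [e1, e2]

theorem pv_A_fold (xs : List String) :
    (PySem.List.pyRange 0 ((xs.length : Int) - 2) 1).foldl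
      (fun d i => pvStepA d (PySem.List.pyGetD xs (i + 1) "", PySem.List.pyGetD xs (i + 2) ""))
      PySem.Dict.empty
    = PySem.Dict.mk (pvF ((xs.drop 1).zip (xs.drop 2))) := by
  rw [PySem.List.pyRange_one, List.foldl_map]
  have hm : ((xs.length : Int) - 2 - 0).toNat = xs.length - 2 := by omega
  rw [hm]
  have hcongr : ∀ (d : PySem.Dict String (PySem.Dict String Int)), ∀ k ∈ List.range (xs.length - 2),
      pvStepA d (PySem.List.pyGetD xs (0 + (k : Int) + 1) "", PySem.List.pyGetD xs (0 + (k : Int) + 2) "")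
      = pvStepA d (xs.getD (k + 1) "", xs.getD (k + 2) "") := by
    intro d k _
    have e1 : (0 + (k : Int) + 1) = ((k + 1 : Nat) : Int) := by push_cast; ring
    have e2 : (0 + (k : Int) + 2) = ((k + 2 : Nat) : Int) := by push_cast; ring
    rw [e1, e2, PySem.List.pyGetD_natCast, PySem.List.pyGetD_natCast]
  rw [PySem.List.foldl_congr_mem _ _ _ _ hcongr, pv_zip_pairs, ← pv_foldA, List.foldl_map]

theorem pv_G_counter (ps : List (String × String)) :
    pvG ((PySem.Set.ofList ps).map (fun k => (k, (ps.count k : Int)))) = pvF ps := by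
  unfold pvG pvF
  have hkeys : ((PySem.Set.ofList ps).map (fun k => (k, (ps.count k : Int)))).map (fun q => q.1.1)
      = (PySem.Set.ofList ps).map Prod.fst := by
    rw [List.map_map]; rfl
  rw [hkeys, pv_ofList_ofList_map]
  apply List.map_congr_left
  intro w hw
  congr 1
  apply PySem.Dict.ext
  show (((PySem.Set.ofList ps).map (fun k => (k, (ps.count k : Int)))).filter
      (fun q => q.1.1 == w)).map (fun q => (q.1.2, q.2)) = pvInn ps w
  rw [List.filter_map, List.map_map]
  unfold pvInn
  have hinj : ∀ a ∈ ps.filter (fun q => q.1 == w), ∀ b ∈ ps.filter (fun q => q.1 == w),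
      Prod.snd a = Prod.snd b → a = b := by
    intro a ha b hb hab
    have ha1 : a.1 = w := by simpa using (List.mem_filter.1 ha).2
    have hb1 : b.1 = w := by simpa using (List.mem_filter.1 hb).2
    cases a; cases b; simp_all
  rw [pv_ofList_map_inj _ _ hinj, pv_ofList_filter, List.map_map]
  apply List.map_congr_left
  intro k hk
  have hk1 : k.1 = w := by
    have := (List.mem_filter.1 hk).2
    simpa using this
  have hkeq : (w, k.2) = k := by cases k; simp_all
  simp only [Function.comp_def]
  rw [hkeq]

theorem pv_A_eq (xs : List String) :
    count_create xs
      = (PySem.Dict.mk (pvF ((xs.drop 1).zip (xs.drop 2)))).items.map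
          (fun p => (p.1, p.2.items)) := by
  exact congrArg (fun d => d.items.map (fun p : String × PySem.Dict String Int => (p.1, p.2.items)))
    (pv_A_fold xs)

theorem pv_B_eq (xs : List String) :
    count_create_alt xs
      = (PySem.Dict.mk (pvF ((xs.drop 1).zip (xs.drop 2)))).items.map
          (fun p => (p.1, p.2.items)) := by
  have hs1 : PySem.List.slice xs (some 1) none = xs.drop 1 := by
    rw [PySem.List.slice_from _ (by norm_num)]; rfl
  have hs2 : PySem.List.slice xs (some 2) none = xs.drop 2 := by
    rw [PySem.List.slice_from _ (by norm_num)]; rfl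
  have hL : ∀ ps : List (String × String),
      ((PySem.Set.ofList ps).map (fun k => (k, (ps.count k : Int)))).map Prod.fst
        = PySem.Set.ofList ps := by
    intro ps; rw [List.map_map]; exact List.map_id _
  simp only [count_create_alt]
  rw [hs1, hs2, PySem.Dict.foldl_insert_getD_add_one_eq_counter, PySem.Dict.items_counter]
  have hnd : ((((PySem.Set.ofList ((xs.drop 1).zip (xs.drop 2))).map
      (fun k => (k, (((xs.drop 1).zip (xs.drop 2)).count k : Int))))).map Prod.fst).Nodup := by
    rw [hL]; exact PySem.Set.nodup_ofList _
  rw [show (fun (r : PySem.Dict String (PySem.Dict String Int)) (q : (String × String) × Int) =>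
        r.insert q.1.1 ((r.getD q.1.1 PySem.Dict.empty).insert q.1.2 q.2)) = pvStepR from rfl,
      pv_foldR _ hnd, pv_G_counter]

-- ===== VERDICT (by name: the statement is the Claim_ definition above) =====
theorem count_create_spec : Claim_equal_count_create := by
  intro xs _
  unfold Spec_count_create
  rw [pv_A_eq, pv_B_eq]
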